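-- pv_equiv track=rewrite | github.com/kostacoffee/NCSSchallenge | 2014/Week 5/Counting Pythons.py | countSkin
-- ===== SOURCE A (Python) =====
-- def countSkin(room, Srow, Scol):
--     skins = 0
--     todo = [(Srow, Scol)]
--     while len(todo) > 0:
--         row, col = todo[0]
--         todo = todo[1:]
--         if (row in range(len(room)) and col in range(len(room[row]))):
--             if (room[row][col] == 'X'):
--                 skins += 1
--                 room[row][col] = '.'
--                 todo.append((row, col + 1))
--                 todo.append((row, col - 1))
--                 todo.append((row + 1, col))
--                 todo.append((row - 1, col))
--                 todo = list(set(todo))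
--     return skins
-- ===== SOURCE B (Python) =====
-- def countSkin(room, Srow, Scol):
--     # Round-based label propagation (Gauss-Seidel saturation): no worklist and no
--     # grid mutation; repeated full-grid passes grow the reachable set until a pass
--     # adds nothing, then the answer is its size.  Correct because the final set is
--     # the least set containing the start cell and closed under X-adjacency, which
--     # is exactly the connected 'X' region A floods.
--     if not (0 <= Srow < len(room) and 0 <= Scol < len(room[Srow]) and room[Srow][Scol] == 'X'):
--         return 0
--     reach = {(Srow, Scol)}
--     changed = True
--     while changed:
--         changed = False
--         for r, row in enumerate(room):
--             for c, ch in enumerate(row):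
--                 if ch == 'X' and (r, c) not in reach and (
--                         (r, c + 1) in reach or (r, c - 1) in reach
--                         or (r + 1, c) in reach or (r - 1, c) in reach):
--                     reach.add((r, c))
--                     changed = True
--     return len(reach)
-- ===== Notes on version B (the rewrite author's own statement) =====
-- stated objective: alternative
-- what changed: Replaces A's worklist flood fill (queue rebuilt by list slicing, list(set(...)) dedup each step, in-place grid mutation) with a worklist-free round-based label-propagation fixpoint: repeated whole-grid passes grow a reachable set until a pass adds nothing, and the answer is that set's size; the grid is never modified.
import Mathlib
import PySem

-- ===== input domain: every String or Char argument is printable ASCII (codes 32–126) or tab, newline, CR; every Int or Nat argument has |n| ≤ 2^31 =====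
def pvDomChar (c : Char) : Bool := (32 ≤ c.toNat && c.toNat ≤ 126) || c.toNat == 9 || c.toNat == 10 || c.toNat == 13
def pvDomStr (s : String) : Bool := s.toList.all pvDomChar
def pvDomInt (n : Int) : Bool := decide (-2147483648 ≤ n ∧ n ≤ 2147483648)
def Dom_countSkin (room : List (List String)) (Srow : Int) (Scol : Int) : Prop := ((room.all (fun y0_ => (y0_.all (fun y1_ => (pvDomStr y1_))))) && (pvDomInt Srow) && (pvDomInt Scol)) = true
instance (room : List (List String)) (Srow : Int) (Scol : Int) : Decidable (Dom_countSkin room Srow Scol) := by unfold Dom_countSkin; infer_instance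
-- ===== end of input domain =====

-- B replaces A's worklist flood fill (queue rebuilt by slicing plus a per-step list(set(..))
-- dedup, and in-place grid mutation, which B does not perform: equivalence is about the
-- RETURN value) by a worklist-free round-based label-propagation fixpoint over the whole grid.

-- ===== shared grid-access helpers (read side, used by both ports) =====
-- room[r]  (only read under the 0 ≤ r < len guard in both Pythons)
def pvRow (g : List (List String)) (r : Int) : List String :=
  (PySem.List.pyGet? g r).getD []
-- room[r][c]  (only read under the bounds guards)
def pvCell (g : List (List String)) (r c : Int) : String :=
  (PySem.List.pyGet? (pvRow g r) c).getD ""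
-- 'r in range(len(room)) and c in range(len(room[r]))'
def pvInB (g : List (List String)) (r c : Int) : Bool :=
  (decide (0 ≤ r) && decide (r < (g.length : Int))) && (decide (0 ≤ c) && decide (c < ((pvRow g r).length : Int)))
def pvIsX (g : List (List String)) (r c : Int) : Bool :=
  pvInB g r c && (pvCell g r c == "X")

-- 'row[c] = "."' on a Nat index (A's in-place write, modelled functionally)
def pvPutDot : List String → Nat → List String
  | [], _ => []
  | _ :: xs, 0 => "." :: xs
  | x :: xs, n+1 => x :: pvPutDot xs n
def pvMarkNat : List (List String) → Nat → Nat → List (List String)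
  | [], _, _ => []
  | row :: rs, 0, c => pvPutDot row c :: rs
  | row :: rs, n+1, c => row :: pvMarkNat rs n c
-- 'room[r][c] = "."'
def pvMark (g : List (List String)) (r c : Int) : List (List String) :=
  if 0 ≤ r ∧ 0 ≤ c then pvMarkNat g r.toNat c.toNat else g

-- number of 'X' cells (termination measure for A's worklist loop)
def pvXRow (row : List String) : Nat := row.countP (fun s => s == "X")
def pvXcount (g : List (List String)) : Nat := (g.map pvXRow).sum

-- ===== grid lemmas needed by the ports' termination proofs =====
theorem pvIsX_eq_nat (g : List (List String)) (r c : Int) :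
    pvIsX g r c = (decide (0 ≤ r) && decide (0 ≤ c) && decide (r.toNat < g.length) &&
      decide (c.toNat < (g[r.toNat]?.getD []).length) &&
      ((g[r.toNat]?.getD [])[c.toNat]?.getD "" == "X")) := by
  by_cases hr : 0 ≤ r
  · by_cases hc : 0 ≤ c
    · have h1 : (r < (g.length : Int)) ↔ (r.toNat < g.length) := by omega
      have hrow : pvRow g r = g[r.toNat]?.getD [] := by
        simp [pvRow, PySem.List.pyGet?_of_nonneg g hr]
      have h2 : (c < ((pvRow g r).length : Int)) ↔ (c.toNat < (g[r.toNat]?.getD []).length) := by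
        rw [hrow]; omega
      have hcell : pvCell g r c = (g[r.toNat]?.getD [])[c.toNat]?.getD "" := by
        simp [pvCell, hrow, PySem.List.pyGet?_of_nonneg _ hc]
      rw [pvIsX, pvInB, hcell]
      simp only [hr, hc, decide_true, h1, h2]
      by_cases h3 : r.toNat < g.length <;> by_cases h4 : c.toNat < (g[r.toNat]?.getD []).length <;>
        simp_all
    · simp [pvIsX, pvInB, hc]
  · simp [pvIsX, pvInB, hr]

theorem pvXRow_putDot_lt (l : List String) (n : Nat) (hn : n < l.length)
    (hx : l[n]?.getD "" = "X") : pvXRow (pvPutDot l n) < pvXRow l := by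
  induction l generalizing n with
  | nil => simp at hn
  | cons x xs ih =>
    cases n with
    | zero =>
      simp at hx
      subst hx
      simp [pvPutDot, pvXRow]
    | succ n =>
      simp at hn hx
      have := ih n (by omega) hx
      simp [pvPutDot, pvXRow, List.countP_cons] at this ⊢
      omega

theorem pvXcount_markNat_lt (g : List (List String)) (a b : Nat)
    (ha : a < g.length) (hb : b < (g[a]?.getD []).length)
    (hx : (g[a]?.getD [])[b]?.getD "" = "X") :
    pvXcount (pvMarkNat g a b) < pvXcount g := by
  induction g generalizing a with
  | nil => simp at ha
  | cons row rs ih =>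
    cases a with
    | zero =>
      simp at hb hx
      have := pvXRow_putDot_lt row b hb hx
      simp [pvMarkNat, pvXcount]
      omega
    | succ a =>
      simp at ha hb hx
      have := ih a ha hb hx
      simp [pvMarkNat, pvXcount] at this ⊢
      omega

theorem pvXcount_mark_lt (g : List (List String)) (r c : Int) (h : pvIsX g r c = true) :
    pvXcount (pvMark g r c) < pvXcount g := by
  rw [pvIsX_eq_nat] at h
  simp only [Bool.and_eq_true, decide_eq_true_eq, beq_iff_eq] at h
  obtain ⟨⟨⟨⟨hr, hc⟩, ha⟩, hb⟩, hx⟩ := h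
  rw [pvMark, if_pos ⟨hr, hc⟩]
  exact pvXcount_markNat_lt g r.toNat c.toNat ha hb hx

theorem pvIsX_of_parts (g : List (List String)) (r c : Int)
    (hb : pvInB g r c = true) (hx : (pvCell g r c == "X") = true) : pvIsX g r c = true := by
  simp [pvIsX, hb, hx]

-- ===== PORT A =====
-- A's while loop: pop todo[0] by slicing, count + mark + append 4 neighbours, todo = list(set(todo)).
def pvCountSkinLoop (g : List (List String)) (todo : List (Int × Int)) (skins : Int) : Int :=
  match todo with
  | [] => skins
  | p :: rest =>
    if hb : pvInB g p.1 p.2 = true then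
      if hx : (pvCell g p.1 p.2 == "X") = true then
        pvCountSkinLoop (pvMark g p.1 p.2)
          (PySem.Set.ofList (rest ++ [(p.1, p.2 + 1), (p.1, p.2 - 1), (p.1 + 1, p.2), (p.1 - 1, p.2)]))
          (skins + 1)
      else pvCountSkinLoop g rest skins
    else pvCountSkinLoop g rest skins
termination_by (pvXcount g, todo.length)
decreasing_by
  · exact Prod.Lex.left _ _ (pvXcount_mark_lt g p.1 p.2 (pvIsX_of_parts g p.1 p.2 hb hx))
  · exact Prod.Lex.right _ (by simp)
  · exact Prod.Lex.right _ (by simp)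

def countSkin (room : List (List String)) (Srow : Int) (Scol : Int) : Int :=
  pvCountSkinLoop room [(Srow, Scol)] 0

-- ===== PORT B =====
-- the 'or' of the four neighbour membership tests
def pvNbrIn (reach : List (Int × Int)) (r c : Int) : Bool :=
  PySem.Set.contains reach (r, c + 1) || PySem.Set.contains reach (r, c - 1) ||
  PySem.Set.contains reach (r + 1, c) || PySem.Set.contains reach (r - 1, c)

-- the body's condition: ch == 'X' and (r,c) not in reach and <a neighbour is in reach>
def pvCond (reach : List (Int × Int)) (r c : Int) (ch : String) : Bool :=
  ch == "X" && !(PySem.Set.contains reach (r, c)) && pvNbrIn reach r c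

-- 'for c, ch in enumerate(row): …'  (c counts up from the given offset)
def pvScanRow (r : Int) : Int → List String → List (Int × Int) × Bool → List (Int × Int) × Bool
  | _, [], st => st
  | c, ch :: rest, st =>
    pvScanRow r (c + 1) rest
      (if pvCond st.1 r c ch then (PySem.Set.add st.1 (r, c), true) else st)

-- 'for r, row in enumerate(room): …'
def pvScanGrid : Int → List (List String) → List (Int × Int) × Bool → List (Int × Int) × Bool
  | _, [], st => st
  | r, row :: rest, st => pvScanGrid (r + 1) rest (pvScanRow r 0 row st)

-- all in-bounds positions of the grid (termination measure for the fixpoint loop)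
def pvAllCells (g : List (List String)) : List (Int × Int) :=
  (List.range g.length).flatMap
    (fun (r : Nat) => (List.range (g[r]?.getD []).length).map (fun (c : Nat) => ((r : Int), (c : Int))))

-- lemmas the fixpoint loop's termination proof cites
theorem pvScanRow_mono (row : List String) (r : Int) : ∀ (c : Int) st (p : Int × Int),
    p ∈ st.1 → p ∈ (pvScanRow r c row st).1 := by
  induction row with
  | nil => intro c st p hp; exact hp
  | cons ch rest ih =>
    intro c st p hp
    rw [pvScanRow]
    apply ih
    split
    · simp [PySem.Set.mem_add, hp]
    · exact hp

theorem pvScanGrid_mono (rows : List (List String)) : ∀ (r : Int) st (p : Int × Int),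
    p ∈ st.1 → p ∈ (pvScanGrid r rows st).1 := by
  induction rows with
  | nil => intro r st p hp; exact hp
  | cons row rest ih =>
    intro r st p hp
    rw [pvScanGrid]
    exact ih _ _ p (pvScanRow_mono row r 0 st p hp)

theorem pvScanRow_grow (row : List String) (r : Int) (A : List (Int × Int)) :
    ∀ (c : Int) st, (∀ (i : Nat) s, row[i]? = some s → (r, c + (i : Int)) ∈ A) →
    st.2 = false → (pvScanRow r c row st).2 = true →
    ∃ p ∈ A, p ∉ st.1 ∧ p ∈ (pvScanRow r c row st).1 := by
  induction row with
  | nil => intro c st _ h2 hres; rw [pvScanRow] at hres; rw [h2] at hres; exact absurd hres (by simp)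
  | cons ch rest ih =>
    intro c st hA h2 hres
    rw [pvScanRow] at hres ⊢
    by_cases hcond : pvCond st.1 r c ch = true
    · refine ⟨(r, c), ?_, ?_, ?_⟩
      · have := hA 0 ch (by simp)
        simpa using this
      · intro hmem
        simp [pvCond] at hcond
        exact hcond.1.2 hmem
      · rw [if_pos hcond]
        exact pvScanRow_mono rest r (c+1) _ (r, c) (by simp [PySem.Set.mem_add])
    · rw [if_neg hcond] at hres ⊢
      have hA' : ∀ (i : Nat) s, rest[i]? = some s → (r, (c + 1) + (i : Int)) ∈ A := by
        intro i s hi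
        have := hA (i + 1) s (by simpa using hi)
        have he : c + ((i : Int) + 1) = (c + 1) + (i : Int) := by ring
        simpa [he] using this
      exact ih (c + 1) st hA' h2 hres

theorem pvScanGrid_grow (rows : List (List String)) (A : List (Int × Int)) :
    ∀ (r : Int) st,
    (∀ (i : Nat) row, rows[i]? = some row → ∀ (j : Nat) s, row[j]? = some s → (r + (i : Int), (j : Int)) ∈ A) →
    st.2 = false → (pvScanGrid r rows st).2 = true →
    ∃ p ∈ A, p ∉ st.1 ∧ p ∈ (pvScanGrid r rows st).1 := by
  induction rows with
  | nil => intro r st _ h2 hres; rw [pvScanGrid] at hres; rw [h2] at hres; exact absurd hres (by simp)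
  | cons row rest ih =>
    intro r st hA h2 hres
    rw [pvScanGrid] at hres ⊢
    by_cases hrow : (pvScanRow r 0 row st).2 = true
    · have hArow : ∀ (i : Nat) s, row[i]? = some s → (r, (0 : Int) + (i : Int)) ∈ A := by
        intro i s hi
        have := hA 0 row (by simp) i s hi
        simpa using this
      obtain ⟨p, hpA, hpn, hpm⟩ := pvScanRow_grow row r A 0 st hArow h2 hrow
      exact ⟨p, hpA, hpn, pvScanGrid_mono rest (r + 1) _ p hpm⟩
    · have hA' : ∀ (i : Nat) row', rest[i]? = some row' →
          ∀ (j : Nat) s, row'[j]? = some s → ((r + 1) + (i : Int), (j : Int)) ∈ A := by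
        intro i row' hi j s hj
        have := hA (i + 1) row' (by simpa using hi) j s hj
        have he : r + ((i : Int) + 1) = (r + 1) + (i : Int) := by ring
        simpa [he] using this
      obtain ⟨p, hpA, hpn, hpm⟩ := ih (r + 1) _ hA' (by simpa using hrow) hres
      refine ⟨p, hpA, fun hp => hpn (pvScanRow_mono row r 0 st p hp), hpm⟩

theorem pvAllCells_hyp (g : List (List String)) :
    ∀ (i : Nat) row, g[i]? = some row → ∀ (j : Nat) s, row[j]? = some s →
      ((0 : Int) + (i : Int), (j : Int)) ∈ pvAllCells g := by
  intro i row hi j s hj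
  have hilen : i < g.length := by
    by_contra h
    rw [List.getElem?_eq_none (by omega)] at hi
    exact absurd hi (by simp)
  have hjlen : j < (g[i]?.getD []).length := by
    rw [hi]
    by_contra h
    rw [List.getElem?_eq_none (by simpa using h)] at hj
    exact absurd hj (by simp)
  simp only [pvAllCells, List.mem_flatMap, List.mem_range, List.mem_map]
  exact ⟨i, hilen, j, hjlen, by simp⟩

theorem pvCountP_lt_of_witness {α : Type} (l : List α) (P Q : α → Bool)
    (hmono : ∀ x ∈ l, P x = true → Q x = true) (a : α) (ha : a ∈ l)
    (hP : P a = false) (hQ : Q a = true) : l.countP P < l.countP Q := by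
  induction l with
  | nil => simp at ha
  | cons x xs ih =>
    rw [List.countP_cons, List.countP_cons]
    rcases List.mem_cons.mp ha with rfl | hxs
    · rw [hP, hQ]
      have : xs.countP P ≤ xs.countP Q :=
        List.countP_mono_left (fun y hy => by
          have := hmono y (by simp [hy]); simp_all)
      simpa using Nat.lt_succ_of_le this
    · have h1 := ih (fun y hy => hmono y (by simp [hy])) hxs
      have h2 : (if P x = true then 1 else 0) ≤ (if Q x = true then 1 else 0) := by
        by_cases hx : P x = true
        · rw [if_pos hx, if_pos (hmono x (by simp) hx)]
        · simp [hx]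
      omega

theorem pvNotMem_iff (s : List (Int × Int)) (x : Int × Int) :
    (!PySem.Set.contains s x) = true ↔ x ∉ s := by
  constructor
  · intro h hm
    rw [(PySem.Set.contains_iff s x).mpr hm] at h
    exact absurd h (by simp)
  · intro hm
    cases hc : PySem.Set.contains s x
    · simp
    · exact absurd ((PySem.Set.contains_iff s x).mp hc) hm

-- 'while changed: changed = False; <grid pass>'  (returns the final reach set)
def pvSatLoop (room : List (List String)) (reach : List (Int × Int)) : List (Int × Int) :=
  if h : (pvScanGrid 0 room (reach, false)).2 = true then
    pvSatLoop room (pvScanGrid 0 room (reach, false)).1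
  else (pvScanGrid 0 room (reach, false)).1
termination_by (pvAllCells room).countP (fun p => !(PySem.Set.contains reach p))
decreasing_by
  obtain ⟨p, hpA, hpn, hpm⟩ :=
    pvScanGrid_grow room (pvAllCells room) 0 (reach, false) (pvAllCells_hyp room) rfl h
  refine pvCountP_lt_of_witness _ _ _ ?_ p hpA ?_ ((pvNotMem_iff _ _).mpr hpn)
  · intro x hx hPx
    exact (pvNotMem_iff _ _).mpr
      (fun hxr => (pvNotMem_iff _ _).mp hPx (pvScanGrid_mono room 0 (reach, false) x hxr))
  · simpa using hpm

def countSkin_alt (room : List (List String)) (Srow : Int) (Scol : Int) : Int :=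
  if pvIsX room Srow Scol then ((pvSatLoop room [(Srow, Scol)]).length : Int)
  else 0

-- ===== PRECONDITION & SPEC =====
def Spec_countSkin (room : List (List String)) (Srow : Int) (Scol : Int) (out : Int) : Prop := out = countSkin_alt room Srow Scol
instance (room : List (List String)) (Srow : Int) (Scol : Int) (out : Int) : Decidable (Spec_countSkin room Srow Scol out) := by unfold Spec_countSkin; infer_instance

-- ===== CLAIM (what is proved, stated in full; the proofs are below) =====
def Claim_equal_countSkin : Prop := ∀ (room : List (List String)) (Srow : Int) (Scol : Int), Dom_countSkin room Srow Scol → Spec_countSkin room Srow Scol (countSkin room Srow Scol)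

-- ===== LEMMAS AND PROOFS =====

theorem pvPutDot_length (l : List String) (n : Nat) : (pvPutDot l n).length = l.length := by
  induction l generalizing n with
  | nil => rfl
  | cons x xs ih => cases n <;> simp [pvPutDot, ih]

theorem pvPutDot_getElem?_ne (l : List String) (n m : Nat) (h : m ≠ n) :
    (pvPutDot l n)[m]? = l[m]? := by
  induction l generalizing n m with
  | nil => rfl
  | cons x xs ih =>
    cases n with
    | zero => cases m with
      | zero => omega
      | succ m => simp [pvPutDot]
    | succ n => cases m with
      | zero => simp [pvPutDot]
      | succ m => simp [pvPutDot, ih n m (by omega)]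

theorem pvMarkNat_length (g : List (List String)) (a b : Nat) :
    (pvMarkNat g a b).length = g.length := by
  induction g generalizing a with
  | nil => rfl
  | cons row rs ih => cases a <;> simp [pvMarkNat, ih]

theorem pvMarkNat_getElem?_ne (g : List (List String)) (a b i : Nat) (h : i ≠ a) :
    (pvMarkNat g a b)[i]? = g[i]? := by
  induction g generalizing a i with
  | nil => rfl
  | cons row rs ih =>
    cases a with
    | zero => cases i with
      | zero => omega
      | succ i => simp [pvMarkNat]
    | succ a => cases i with
      | zero => simp [pvMarkNat]
      | succ i => simp [pvMarkNat, ih a i (by omega)]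

theorem pvMarkNat_getElem?_self (g : List (List String)) (a b : Nat) :
    (pvMarkNat g a b)[a]? = g[a]?.map (fun row => pvPutDot row b) := by
  induction g generalizing a with
  | nil => rfl
  | cons row rs ih => cases a <;> simp [pvMarkNat, ih]

def pvNbrs (p : Int × Int) : List (Int × Int) :=
  [(p.1, p.2 + 1), (p.1, p.2 - 1), (p.1 + 1, p.2), (p.1 - 1, p.2)]

-- canonical flood count: process a worklist, skip non-X heads, mark and expand X heads
def pvCountP : List (List String) → List (Int × Int) → Nat
  | _, [] => 0
  | g, p :: t =>
    if _h : pvIsX g p.1 p.2 = true then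
      1 + pvCountP (pvMark g p.1 p.2) (pvNbrs p ++ t)
    else pvCountP g t
termination_by g todo => (pvXcount g, todo.length)
decreasing_by
  · exact Prod.Lex.left _ _ (pvXcount_mark_lt g p.1 p.2 _h)
  · exact Prod.Lex.right _ (by simp)

theorem pvCountP_nil (g : List (List String)) : pvCountP g [] = 0 := by
  simp [pvCountP]

theorem pvCountP_cons_pos (g : List (List String)) (p : Int × Int) (t : List (Int × Int))
    (h : pvIsX g p.1 p.2 = true) :
    pvCountP g (p :: t) = 1 + pvCountP (pvMark g p.1 p.2) (pvNbrs p ++ t) := by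
  rw [pvCountP]; simp [h]

theorem pvCountP_cons_neg (g : List (List String)) (p : Int × Int) (t : List (Int × Int))
    (h : pvIsX g p.1 p.2 = false) :
    pvCountP g (p :: t) = pvCountP g t := by
  rw [pvCountP]; simp [h]

theorem pvPutDot_getElem?_self (l : List String) (n : Nat) :
    (pvPutDot l n)[n]? = l[n]?.map (fun _ => ".") := by
  induction l generalizing n with
  | nil => rfl
  | cons x xs ih => cases n <;> simp [pvPutDot, ih]

theorem pvIsX_mark_self (g : List (List String)) (r c : Int) :
    pvIsX (pvMark g r c) r c = false := by
  by_cases h0 : 0 ≤ r ∧ 0 ≤ c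
  · rw [pvMark, if_pos h0, pvIsX_eq_nat]
    rw [pvMarkNat_length, pvMarkNat_getElem?_self]
    cases hg : g[r.toNat]? with
    | none => simp
    | some row =>
      simp only [Option.map_some, Option.getD_some, pvPutDot_length, pvPutDot_getElem?_self]
      cases row[c.toNat]? <;> simp
  · rw [pvMark, if_neg h0, pvIsX_eq_nat]
    rcases not_and_or.mp h0 with h | h <;> simp [h]

theorem pvIsX_mark_ne (g : List (List String)) (r c r' c' : Int) (h : ¬(r' = r ∧ c' = c)) :
    pvIsX (pvMark g r c) r' c' = pvIsX g r' c' := by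
  by_cases h0 : 0 ≤ r ∧ 0 ≤ c
  · rw [pvMark, if_pos h0]
    rw [pvIsX_eq_nat, pvIsX_eq_nat]
    by_cases hr' : 0 ≤ r'
    · by_cases hc' : 0 ≤ c'
      · rw [pvMarkNat_length]
        by_cases hrr : r'.toNat = r.toNat
        · have hre : r' = r := by omega
          have hcc : c' ≠ c := fun hcc => h ⟨hre, hcc⟩
          have hcn : c'.toNat ≠ c.toNat := by omega
          rw [hrr, pvMarkNat_getElem?_self]
          cases hg : g[r.toNat]? with
          | none => simp
          | some row =>
            simp only [Option.map_some, Option.getD_some, pvPutDot_length,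
              pvPutDot_getElem?_ne row c.toNat c'.toNat hcn]
            rfl
        · rw [pvMarkNat_getElem?_ne g r.toNat c.toNat r'.toNat hrr]
      · simp [hc']
    · simp [hr']
  · rw [pvMark, if_neg h0]

theorem pvIsX_mark_false (g : List (List String)) (q : Int × Int) (r c : Int)
    (h : pvIsX g r c = false) : pvIsX (pvMark g q.1 q.2) r c = false := by
  by_cases hpq : r = q.1 ∧ c = q.2
  · obtain ⟨h1, h2⟩ := hpq
    rw [h1, h2]
    exact pvIsX_mark_self g q.1 q.2
  · rw [pvIsX_mark_ne g q.1 q.2 r c hpq]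
    exact h

theorem pvIsX_of_mark (g : List (List String)) (a b r c : Int)
    (h : pvIsX (pvMark g a b) r c = true) : pvIsX g r c = true := by
  by_cases hpq : r = a ∧ c = b
  · obtain ⟨h1, h2⟩ := hpq
    rw [h1, h2] at h
    rw [pvIsX_mark_self] at h
    exact absurd h (by simp)
  · rw [pvIsX_mark_ne g a b r c hpq] at h
    exact h

theorem pvCountP_drop_aux (N : Nat) : ∀ g, pvXcount g < N →
    ∀ (l : List (Int × Int)) (p : Int × Int) (t : List (Int × Int)),
    pvIsX g p.1 p.2 = false → pvCountP g (l ++ p :: t) = pvCountP g (l ++ t) := by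
  induction N with
  | zero => intro g hg; omega
  | succ N ihN =>
    intro g hg l
    induction l with
    | nil =>
      intro p t h
      simpa using pvCountP_cons_neg g p t h
    | cons q l ih =>
      intro p t h
      by_cases hq : pvIsX g q.1 q.2 = true
      · rw [List.cons_append, List.cons_append, pvCountP_cons_pos g q _ hq,
          pvCountP_cons_pos g q _ hq]
        have hlt := pvXcount_mark_lt g q.1 q.2 hq
        have := ihN (pvMark g q.1 q.2) (by omega) (pvNbrs q ++ l) p t
          (pvIsX_mark_false g q p.1 p.2 h)
        simpa [List.append_assoc] using this
      · have hq' : pvIsX g q.1 q.2 = false := by simpa using hq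
        rw [List.cons_append, List.cons_append, pvCountP_cons_neg g q _ hq',
          pvCountP_cons_neg g q _ hq']
        exact ih p t h

-- a non-X worklist entry can be dropped anywhere
theorem pvCountP_drop (g : List (List String)) (l : List (Int × Int)) (p : Int × Int)
    (t : List (Int × Int)) (h : pvIsX g p.1 p.2 = false) :
    pvCountP g (l ++ p :: t) = pvCountP g (l ++ t) :=
  pvCountP_drop_aux (pvXcount g + 1) g (by omega) l p t h

theorem pvPutDot_comm (row : List String) (b b' : Nat) (h : b ≠ b') :
    pvPutDot (pvPutDot row b) b' = pvPutDot (pvPutDot row b') b := by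
  induction row generalizing b b' with
  | nil => rfl
  | cons x xs ih =>
    cases b with
    | zero => cases b' with
      | zero => omega
      | succ b' => simp [pvPutDot]
    | succ b => cases b' with
      | zero => simp [pvPutDot]
      | succ b' => simp [pvPutDot, ih b b' (by omega)]

theorem pvMarkNat_comm (g : List (List String)) (a b a' b' : Nat)
    (h : a ≠ a' ∨ b ≠ b') :
    pvMarkNat (pvMarkNat g a b) a' b' = pvMarkNat (pvMarkNat g a' b') a b := by
  induction g generalizing a a' with
  | nil => rfl
  | cons row rs ih =>
    cases a with
    | zero => cases a' with
      | zero =>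
        have hb : b ≠ b' := by omega
        simp [pvMarkNat, pvPutDot_comm row b b' hb]
      | succ a' => simp [pvMarkNat]
    | succ a => cases a' with
      | zero => simp [pvMarkNat]
      | succ a' =>
        have : a ≠ a' ∨ b ≠ b' := by omega
        simp [pvMarkNat, ih a a' this]

theorem pvMark_comm (g : List (List String)) (r c r' c' : Int) (h : ¬(r' = r ∧ c' = c)) :
    pvMark (pvMark g r c) r' c' = pvMark (pvMark g r' c') r c := by
  by_cases g1 : 0 ≤ r ∧ 0 ≤ c
  · by_cases g2 : 0 ≤ r' ∧ 0 ≤ c'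
    · simp only [pvMark, if_pos g1, if_pos g2]
      have : r.toNat ≠ r'.toNat ∨ c.toNat ≠ c'.toNat := by
        by_cases hr : r' = r
        · right; have : c' ≠ c := fun hc => h ⟨hr, hc⟩; omega
        · left; omega
      exact pvMarkNat_comm g r.toNat c.toNat r'.toNat c'.toNat this
    · simp [pvMark, g1, g2]
  · by_cases g2 : 0 ≤ r' ∧ 0 ≤ c' <;> simp [pvMark, g1, g2]

-- the flood count does not depend on the worklist order
theorem pvCountP_perm_aux (N : Nat) : ∀ {t t' : List (Int × Int)}, t.Perm t' →
    ∀ g, pvXcount g < N → pvCountP g t = pvCountP g t' := by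
  induction N with
  | zero => intro t t' _ g hg; omega
  | succ N ihN =>
    intro t t' hp
    induction hp with
    | nil => intro g _; rfl
    | cons x p ih =>
      intro g hg
      by_cases hx : pvIsX g x.1 x.2 = true
      · rw [pvCountP_cons_pos _ _ _ hx, pvCountP_cons_pos _ _ _ hx]
        have hlt := pvXcount_mark_lt g x.1 x.2 hx
        rw [ihN (p.append_left (pvNbrs x)) (pvMark g x.1 x.2) (by omega)]
      · have hx' : pvIsX g x.1 x.2 = false := by simpa using hx
        rw [pvCountP_cons_neg _ _ _ hx', pvCountP_cons_neg _ _ _ hx']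
        exact ih g hg
    | swap x y l =>
      intro g hg
      by_cases hx : pvIsX g x.1 x.2 = true <;> by_cases hy : pvIsX g y.1 y.2 = true
      · -- both X
        by_cases hxy : x = y
        · subst hxy; rfl
        · have hxy' : ¬(x.1 = y.1 ∧ x.2 = y.2) := fun hh => hxy (Prod.ext hh.1 hh.2)
          have hyx' : ¬(y.1 = x.1 ∧ y.2 = x.2) := fun hh => hxy (Prod.ext hh.1.symm hh.2.symm)
          have hgylt := pvXcount_mark_lt g y.1 y.2 hy
          have hgxlt := pvXcount_mark_lt g x.1 x.2 hx
          have hxgy : pvIsX (pvMark g y.1 y.2) x.1 x.2 = true := by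
            rw [pvIsX_mark_ne g y.1 y.2 x.1 x.2 hxy']; exact hx
          have hygx : pvIsX (pvMark g x.1 x.2) y.1 y.2 = true := by
            rw [pvIsX_mark_ne g x.1 x.2 y.1 y.2 hyx']; exact hy
          rw [pvCountP_cons_pos _ _ _ hy,
            ihN List.perm_middle (pvMark g y.1 y.2) (by omega),
            pvCountP_cons_pos _ _ _ hxgy,
            pvCountP_cons_pos _ _ _ hx,
            ihN List.perm_middle (pvMark g x.1 x.2) (by omega),
            pvCountP_cons_pos _ _ _ hygx]
          have hcomm : pvMark (pvMark g y.1 y.2) x.1 x.2 = pvMark (pvMark g x.1 x.2) y.1 y.2 :=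
            pvMark_comm g y.1 y.2 x.1 x.2 hxy'
          have hlt2 := pvXcount_mark_lt (pvMark g y.1 y.2) x.1 x.2 hxgy
          have hperm : (pvNbrs x ++ (pvNbrs y ++ l)).Perm (pvNbrs y ++ (pvNbrs x ++ l)) := by
            rw [← List.append_assoc, ← List.append_assoc]
            exact List.Perm.append_right l List.perm_append_comm
          rw [ihN hperm (pvMark (pvMark g y.1 y.2) x.1 x.2) (by omega), hcomm]
      · -- x X, y not
        have hy' : pvIsX g y.1 y.2 = false := by simpa using hy
        rw [pvCountP_cons_neg _ _ _ hy', pvCountP_cons_pos _ _ _ hx,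
          pvCountP_cons_pos _ _ _ hx,
          pvCountP_drop (pvMark g x.1 x.2) (pvNbrs x) y l
            (pvIsX_mark_false g x y.1 y.2 hy')]
      · -- y X, x not
        have hx' : pvIsX g x.1 x.2 = false := by simpa using hx
        rw [pvCountP_cons_pos _ _ _ hy, pvCountP_cons_neg _ _ _ hx',
          pvCountP_cons_pos _ _ _ hy,
          pvCountP_drop (pvMark g y.1 y.2) (pvNbrs y) x l
            (pvIsX_mark_false g y x.1 x.2 hx')]
      · -- neither
        have hx' : pvIsX g x.1 x.2 = false := by simpa using hx
        have hy' : pvIsX g y.1 y.2 = false := by simpa using hy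
        rw [pvCountP_cons_neg _ _ _ hy', pvCountP_cons_neg _ _ _ hx',
          pvCountP_cons_neg _ _ _ hx', pvCountP_cons_neg _ _ _ hy']
    | trans p1 p2 ih1 ih2 =>
      intro g hg
      exact (ih1 g hg).trans (ih2 g hg)

theorem pvCountP_perm (g : List (List String)) {t t' : List (Int × Int)} (hp : t.Perm t') :
    pvCountP g t = pvCountP g t' :=
  pvCountP_perm_aux (pvXcount g + 1) hp g (by omega)

theorem pvCountP_dup_aux (N : Nat) : ∀ g, pvXcount g < N →
    ∀ (l₁ : List (Int × Int)) (p : Int × Int) (l₂ : List (Int × Int)), p ∈ l₁ →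
    pvCountP g (l₁ ++ p :: l₂) = pvCountP g (l₁ ++ l₂) := by
  induction N with
  | zero => intro g hg; omega
  | succ N ihN =>
    intro g hg l₁
    induction l₁ with
    | nil => intro p l₂ hm; simp at hm
    | cons q l ih =>
      intro p l₂ hm
      by_cases hq : pvIsX g q.1 q.2 = true
      · rw [List.cons_append, List.cons_append, pvCountP_cons_pos g q _ hq,
          pvCountP_cons_pos g q _ hq]
        have hlt := pvXcount_mark_lt g q.1 q.2 hq
        by_cases hpq : p = q
        · subst hpq
          have hfalse : pvIsX (pvMark g p.1 p.2) p.1 p.2 = false := pvIsX_mark_self g p.1 p.2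
          have := pvCountP_drop (pvMark g p.1 p.2) (pvNbrs p ++ l) p l₂ hfalse
          simpa [List.append_assoc] using this
        · have hpl : p ∈ l := by
            rcases List.mem_cons.mp hm with h | h
            · exact absurd h hpq
            · exact h
          have := ihN (pvMark g q.1 q.2) (by omega) (pvNbrs q ++ l) p l₂
            (by simp [hpl])
          simpa [List.append_assoc] using this
      · have hq' : pvIsX g q.1 q.2 = false := by simpa using hq
        rw [List.cons_append, List.cons_append, pvCountP_cons_neg g q _ hq',
          pvCountP_cons_neg g q _ hq']
        by_cases hpq : p = q
        · subst hpq
          exact pvCountP_drop g l p l₂ hq'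
        · have hpl : p ∈ l := by
            rcases List.mem_cons.mp hm with h | h
            · exact absurd h hpq
            · exact h
          exact ih p l₂ hpl

-- a duplicated worklist entry can be dropped
theorem pvCountP_dup (g : List (List String)) (l₁ : List (Int × Int)) (p : Int × Int)
    (l₂ : List (Int × Int)) (h : p ∈ l₁) :
    pvCountP g (l₁ ++ p :: l₂) = pvCountP g (l₁ ++ l₂) :=
  pvCountP_dup_aux (pvXcount g + 1) g (by omega) l₁ p l₂ h

theorem pvExists_dup : ∀ {l : List (Int × Int)}, ¬ l.Nodup →
    ∃ l₁ a l₂, l = l₁ ++ a :: l₂ ∧ a ∈ l₁ := by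
  intro l
  induction l with
  | nil => intro h; exact absurd List.nodup_nil h
  | cons x xs ih =>
    intro h
    by_cases hx : x ∈ xs
    · obtain ⟨s, t, rfl⟩ := List.append_of_mem hx
      exact ⟨x :: s, x, t, by simp, by simp⟩
    · have hxs : ¬ xs.Nodup := by
        intro hnd
        exact h (List.nodup_cons.mpr ⟨hx, hnd⟩)
      obtain ⟨l₁, a, l₂, heq, hm⟩ := ih hxs
      exact ⟨x :: l₁, a, l₂, by simp [heq], by simp [hm]⟩

theorem pvCountP_dedup (g : List (List String)) (t : List (Int × Int)) :
    pvCountP g t = pvCountP g t.dedup := by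
  suffices H : ∀ n (t : List (Int × Int)), t.length ≤ n → ∀ g,
      pvCountP g t = pvCountP g t.dedup by
    exact H t.length t le_rfl g
  intro n
  induction n with
  | zero =>
    intro t ht g
    have : t = [] := List.eq_nil_of_length_eq_zero (by omega)
    subst this; rfl
  | succ n ihn =>
    intro t ht g
    by_cases hnd : t.Nodup
    · rw [List.Nodup.dedup hnd]
    · obtain ⟨l₁, a, l₂, rfl, hm⟩ := pvExists_dup hnd
      rw [pvCountP_dup g l₁ a l₂ hm]
      have hlen : (l₁ ++ l₂).length ≤ n := by
        simp only [List.length_append, List.length_cons] at ht ⊢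
        omega
      rw [ihn (l₁ ++ l₂) hlen g]
      refine pvCountP_perm g ?_
      refine (List.perm_ext_iff_of_nodup (List.nodup_dedup _) (List.nodup_dedup _)).2 ?_
      intro x
      simp only [List.mem_dedup, List.mem_append, List.mem_cons]
      constructor
      · rintro (h | h)
        · exact Or.inl h
        · exact Or.inr (Or.inr h)
      · rintro (h | h | h)
        · exact Or.inl h
        · subst h; exact Or.inl hm
        · exact Or.inr h

-- the flood count depends only on the SET of worklist entries
theorem pvCountP_congr_mem (g : List (List String)) {t t' : List (Int × Int)}
    (h : ∀ x, x ∈ t ↔ x ∈ t') : pvCountP g t = pvCountP g t' := by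
  rw [pvCountP_dedup g t, pvCountP_dedup g t']
  exact pvCountP_perm g
    ((List.perm_ext_iff_of_nodup (List.nodup_dedup _) (List.nodup_dedup _)).2
      (by intro x; simpa [List.mem_dedup] using h x))

-- unfolding lemmas for A's loop
theorem pvA_nil (g : List (List String)) (skins : Int) : pvCountSkinLoop g [] skins = skins := by
  rw [pvCountSkinLoop]

theorem pvA_pos (g : List (List String)) (p : Int × Int) (rest : List (Int × Int)) (skins : Int)
    (h : pvIsX g p.1 p.2 = true) :
    pvCountSkinLoop g (p :: rest) skins =
      pvCountSkinLoop (pvMark g p.1 p.2) (PySem.Set.ofList (rest ++ pvNbrs p)) (skins + 1) := by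
  have h' := h
  simp only [pvIsX, Bool.and_eq_true, beq_iff_eq] at h'
  rw [pvCountSkinLoop]
  simp [h'.1, h'.2, pvNbrs]

theorem pvA_neg (g : List (List String)) (p : Int × Int) (rest : List (Int × Int)) (skins : Int)
    (h : pvIsX g p.1 p.2 = false) :
    pvCountSkinLoop g (p :: rest) skins = pvCountSkinLoop g rest skins := by
  rw [pvCountSkinLoop]
  split_ifs with hb hc
  · exact absurd (pvIsX_of_parts g p.1 p.2 hb hc) (by simp [h])
  · rfl
  · rfl

-- A's loop computes skins + flood count
theorem pvA_loop_aux (N : Nat) : ∀ g, pvXcount g < N → ∀ todo skins,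
    pvCountSkinLoop g todo skins = skins + (pvCountP g todo : Int) := by
  induction N with
  | zero => intro g hg; omega
  | succ N ihN =>
    intro g hg todo
    induction todo with
    | nil => intro skins; rw [pvA_nil, pvCountP_nil]; simp
    | cons p t ih =>
      intro skins
      by_cases hx : pvIsX g p.1 p.2 = true
      · rw [pvA_pos g p t skins hx, pvCountP_cons_pos g p t hx]
        have hlt := pvXcount_mark_lt g p.1 p.2 hx
        rw [ihN (pvMark g p.1 p.2) (by omega)]
        have hmem : pvCountP (pvMark g p.1 p.2) (PySem.Set.ofList (t ++ pvNbrs p)) =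
            pvCountP (pvMark g p.1 p.2) (pvNbrs p ++ t) :=
          pvCountP_congr_mem _ (by
            intro x
            simp only [PySem.Set.mem_ofList, List.mem_append]
            tauto)
        rw [hmem]
        push_cast
        ring
      · have hx' : pvIsX g p.1 p.2 = false := by simpa using hx
        rw [pvA_neg g p t skins hx', pvCountP_cons_neg g p t hx']
        exact ih skins

theorem pvA_loop_eq (g : List (List String)) (todo : List (Int × Int)) (skins : Int) :
    pvCountSkinLoop g todo skins = skins + (pvCountP g todo : Int) :=
  pvA_loop_aux (pvXcount g + 1) g (by omega) todo skins

-- ===== the connected region as a least set: pvLeast g T = the X-cells reachable from T =====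
inductive pvLeast (g : List (List String)) (T : List (Int × Int)) : Int × Int → Prop
  | base (p : Int × Int) : p ∈ T → pvIsX g p.1 p.2 = true → pvLeast g T p
  | step (p q : Int × Int) : pvLeast g T p → q ∈ pvNbrs p → pvIsX g q.1 q.2 = true → pvLeast g T q

theorem pvLeast_isX (g : List (List String)) (T : List (Int × Int)) (p : Int × Int)
    (h : pvLeast g T p) : pvIsX g p.1 p.2 = true := by
  cases h with
  | base _ _ hx => exact hx
  | step _ _ _ _ hx => exact hx

theorem pvLeast_nil (g : List (List String)) (p : Int × Int) : ¬ pvLeast g [] p := by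
  intro h
  induction h with
  | base q hq _ => simp at hq
  | step _ _ _ _ _ ih => exact ih

theorem pvLeast_cons_notX (g : List (List String)) (T : List (Int × Int)) (p : Int × Int)
    (hx : pvIsX g p.1 p.2 = false) (q : Int × Int) :
    pvLeast g (p :: T) q ↔ pvLeast g T q := by
  constructor
  · intro h
    induction h with
    | base a ha hxa =>
      rcases List.mem_cons.mp ha with rfl | ha'
      · rw [hxa] at hx; exact absurd hx (by simp)
      · exact pvLeast.base a ha' hxa
    | step a b _ hb hxb ih => exact pvLeast.step a b ih hb hxb
  · intro h
    induction h with
    | base a ha hxa => exact pvLeast.base a (by simp [ha]) hxa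
    | step a b _ hb hxb ih => exact pvLeast.step a b ih hb hxb

theorem pvLeast_key (g : List (List String)) (T : List (Int × Int)) (p : Int × Int)
    (hx : pvIsX g p.1 p.2 = true) (q : Int × Int) :
    pvLeast g (p :: T) q ↔ (q = p ∨ pvLeast (pvMark g p.1 p.2) (pvNbrs p ++ T) q) := by
  constructor
  · intro h
    induction h with
    | base a ha hxa =>
      by_cases hap : a = p
      · exact Or.inl hap
      · right
        rcases List.mem_cons.mp ha with rfl | ha'
        · exact absurd rfl hap
        · refine pvLeast.base a (by simp [ha']) ?_
          rw [pvIsX_mark_ne g p.1 p.2 a.1 a.2 (fun hh => hap (Prod.ext hh.1 hh.2))]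
          exact hxa
    | step a b _ hb hxb ih =>
      by_cases hbp : b = p
      · exact Or.inl hbp
      · right
        have hxb' : pvIsX (pvMark g p.1 p.2) b.1 b.2 = true := by
          rw [pvIsX_mark_ne g p.1 p.2 b.1 b.2 (fun hh => hbp (Prod.ext hh.1 hh.2))]
          exact hxb
        rcases ih with rfl | ha'
        · exact pvLeast.base b (by simp [hb]) hxb'
        · exact pvLeast.step a b ha' hb hxb'
  · intro h
    rcases h with rfl | h
    · exact pvLeast.base q (by simp) hx
    · induction h with
      | base a ha hxa =>
        have hxa' : pvIsX g a.1 a.2 = true := pvIsX_of_mark g p.1 p.2 a.1 a.2 hxa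
        rcases List.mem_append.mp ha with hn | ht
        · exact pvLeast.step p a (pvLeast.base p (by simp) hx) hn hxa'
        · exact pvLeast.base a (by simp [ht]) hxa'
      | step a b _ hb hxb ih =>
        exact pvLeast.step a b ih hb (pvIsX_of_mark g p.1 p.2 b.1 b.2 hxb)

theorem pvAllCells_of_isX (g : List (List String)) (p : Int × Int)
    (h : pvIsX g p.1 p.2 = true) : p ∈ pvAllCells g := by
  rw [pvIsX_eq_nat] at h
  simp only [Bool.and_eq_true, decide_eq_true_eq, beq_iff_eq] at h
  obtain ⟨⟨⟨⟨hr, hc⟩, ha⟩, hb⟩, _⟩ := h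
  simp only [pvAllCells, List.mem_flatMap, List.mem_range, List.mem_map]
  refine ⟨p.1.toNat, ha, p.2.toNat, hb, ?_⟩
  apply Prod.ext <;> simp <;> omega

theorem pvLeast_finite (g : List (List String)) (T : List (Int × Int)) :
    (setOf (pvLeast g T)).Finite := by
  refine Set.Finite.subset (pvAllCells g).finite_toSet ?_
  intro p hp
  exact pvAllCells_of_isX g p (pvLeast_isX g T p hp)

theorem pvLeast_not_mark (g : List (List String)) (p : Int × Int) (T : List (Int × Int)) :
    ¬ pvLeast (pvMark g p.1 p.2) T p := by
  intro h
  have := pvLeast_isX _ T p h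
  rw [pvIsX_mark_self] at this
  exact absurd this (by simp)

-- A's flood count IS the size of the least reachable X-region
theorem pvCountP_eq_ncard_aux (N : Nat) : ∀ g, pvXcount g < N → ∀ T,
    pvCountP g T = (setOf (pvLeast g T)).ncard := by
  induction N with
  | zero => intro g hg; omega
  | succ N ihN =>
    intro g hg T
    induction T with
    | nil =>
      rw [pvCountP_nil]
      have : setOf (pvLeast g []) = ∅ := by
        ext p; simp [pvLeast_nil g p]
      rw [this, Set.ncard_empty]
    | cons p t ih =>
      by_cases hx : pvIsX g p.1 p.2 = true
      · rw [pvCountP_cons_pos g p t hx]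
        have hlt := pvXcount_mark_lt g p.1 p.2 hx
        rw [ihN (pvMark g p.1 p.2) (by omega) (pvNbrs p ++ t)]
        have hset : setOf (pvLeast g (p :: t)) =
            insert p (setOf (pvLeast (pvMark g p.1 p.2) (pvNbrs p ++ t))) := by
          ext q
          simp only [Set.mem_insert_iff, Set.mem_setOf_eq]
          exact pvLeast_key g t p hx q
        have hnotmem : p ∉ setOf (pvLeast (pvMark g p.1 p.2) (pvNbrs p ++ t)) :=
          pvLeast_not_mark g p (pvNbrs p ++ t)
        rw [hset, Set.ncard_insert_of_notMem hnotmem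
          (pvLeast_finite (pvMark g p.1 p.2) (pvNbrs p ++ t))]
        omega
      · have hx' : pvIsX g p.1 p.2 = false := by simpa using hx
        rw [pvCountP_cons_neg g p t hx']
        rw [ih]
        congr 1
        ext q
        simp only [Set.mem_setOf_eq]
        exact (pvLeast_cons_notX g t p hx' q).symm

theorem pvCountP_eq_ncard (g : List (List String)) (T : List (Int × Int)) :
    pvCountP g T = (setOf (pvLeast g T)).ncard :=
  pvCountP_eq_ncard_aux (pvXcount g + 1) g (by omega) T

-- ===== B-side: the saturation loop computes exactly the least reachable region =====

theorem pvScanRow_flag (row : List String) (r : Int) : ∀ (c : Int) st,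
    st.2 = true → (pvScanRow r c row st).2 = true := by
  induction row with
  | nil => intro c st h; exact h
  | cons ch rest ih =>
    intro c st h
    rw [pvScanRow]
    apply ih
    split
    · rfl
    · exact h

theorem pvScanRow_fix (row : List String) (r : Int) : ∀ (c : Int) st,
    (pvScanRow r c row st).2 = false →
    pvScanRow r c row st = st ∧
      ∀ (i : Nat) s, row[i]? = some s → pvCond st.1 r (c + (i : Int)) s = false := by
  induction row with
  | nil =>
    intro c st h
    refine ⟨rfl, ?_⟩
    intro i s hi; simp at hi
  | cons ch rest ih =>
    intro c st h
    rw [pvScanRow] at h ⊢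
    by_cases hcond : pvCond st.1 r c ch = true
    · rw [if_pos hcond] at h
      have := pvScanRow_flag rest r (c + 1) (PySem.Set.add st.1 (r, c), true) rfl
      rw [this] at h
      exact absurd h (by simp)
    · rw [if_neg hcond] at h ⊢
      obtain ⟨heq, hcf⟩ := ih (c + 1) st h
      refine ⟨heq, ?_⟩
      intro i s hi
      cases i with
      | zero =>
        simp at hi
        subst hi
        simpa using (by simpa using hcond : pvCond st.1 r c ch = false)
      | succ i =>
        have := hcf i s (by simpa using hi)
        have he : c + ((i : Int) + 1) = (c + 1) + (i : Int) := by ring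
        simpa [he] using this

theorem pvScanGrid_flag (rows : List (List String)) : ∀ (r : Int) st,
    st.2 = true → (pvScanGrid r rows st).2 = true := by
  induction rows with
  | nil => intro r st h; exact h
  | cons row rest ih =>
    intro r st h
    rw [pvScanGrid]
    exact ih _ _ (pvScanRow_flag row r 0 st h)

theorem pvScanGrid_fix (rows : List (List String)) : ∀ (r : Int) st,
    (pvScanGrid r rows st).2 = false →
    pvScanGrid r rows st = st ∧
      ∀ (i : Nat) row, rows[i]? = some row →
        ∀ (j : Nat) s, row[j]? = some s → pvCond st.1 (r + (i : Int)) (j : Int) s = false := by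
  induction rows with
  | nil =>
    intro r st h
    refine ⟨rfl, ?_⟩
    intro i row hi; simp at hi
  | cons row rest ih =>
    intro r st h
    rw [pvScanGrid] at h ⊢
    by_cases hrow : (pvScanRow r 0 row st).2 = true
    · have := pvScanGrid_flag rest (r + 1) _ hrow
      rw [this] at h
      exact absurd h (by simp)
    · have hrow' : (pvScanRow r 0 row st).2 = false := by simpa using hrow
      obtain ⟨heq1, hcf1⟩ := pvScanRow_fix row r 0 st hrow'
      rw [heq1] at h ⊢
      obtain ⟨heq2, hcf2⟩ := ih (r + 1) st h
      refine ⟨heq2, ?_⟩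
      intro i row' hi j s hj
      cases i with
      | zero =>
        simp at hi
        subst hi
        have := hcf1 j s hj
        simpa using this
      | succ i =>
        have := hcf2 i row' (by simpa using hi) j s hj
        have he : r + ((i : Int) + 1) = (r + 1) + (i : Int) := by ring
        simpa [he] using this

-- soundness of one pass: everything added lies in the least region
theorem pvScanRow_sound (g : List (List String)) (T : List (Int × Int)) (row : List String)
    (r : Int) : ∀ (c : Int) st,
    (∀ (i : Nat) s, row[i]? = some s → s = "X" → pvIsX g r (c + (i : Int)) = true) →
    (∀ p ∈ st.1, pvLeast g T p) →
    ∀ p ∈ (pvScanRow r c row st).1, pvLeast g T p := by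
  induction row with
  | nil => intro c st _ hst p hp; exact hst p hp
  | cons ch rest ih =>
    intro c st hrow hst
    rw [pvScanRow]
    have hnext : ∀ (i : Nat) s, rest[i]? = some s → s = "X" →
        pvIsX g r ((c + 1) + (i : Int)) = true := by
      intro i s hi hs
      have := hrow (i + 1) s (by simpa using hi) hs
      have he : c + ((i : Int) + 1) = (c + 1) + (i : Int) := by ring
      simpa [he] using this
    by_cases hcond : pvCond st.1 r c ch = true
    · rw [if_pos hcond]
      apply ih (c + 1) _ hnext
      intro p hp
      rcases (PySem.Set.mem_add _ _ _).mp hp with hp' | rfl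
      · exact hst p hp'
      · -- the added cell (r, c): X with a neighbour in st.1
        simp only [pvCond, Bool.and_eq_true, beq_iff_eq, Bool.not_eq_true'] at hcond
        obtain ⟨⟨hch, _⟩, hnbr⟩ := hcond
        have hxrc : pvIsX g r c = true := by
          have := hrow 0 ch (by simp) hch
          simpa using this
        simp only [pvNbrIn, Bool.or_eq_true] at hnbr
        rcases hnbr with ((h1 | h2) | h3) | h4
        · have hm := (PySem.Set.contains_iff _ _).mp h1
          refine pvLeast.step (r, c + 1) (r, c) (hst _ hm) ?_ hxrc
          simp [pvNbrs]
        · have hm := (PySem.Set.contains_iff _ _).mp h2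
          refine pvLeast.step (r, c - 1) (r, c) (hst _ hm) ?_ hxrc
          simp [pvNbrs]
        · have hm := (PySem.Set.contains_iff _ _).mp h3
          refine pvLeast.step (r + 1, c) (r, c) (hst _ hm) ?_ hxrc
          simp [pvNbrs]
        · have hm := (PySem.Set.contains_iff _ _).mp h4
          refine pvLeast.step (r - 1, c) (r, c) (hst _ hm) ?_ hxrc
          simp [pvNbrs]
    · rw [if_neg hcond]
      exact ih (c + 1) st hnext hst

theorem pvScanGrid_sound (g : List (List String)) (T : List (Int × Int))
    (rows : List (List String)) : ∀ (r : Int) st,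
    (∀ (i : Nat) row, rows[i]? = some row → ∀ (j : Nat) s, row[j]? = some s → s = "X" →
      pvIsX g (r + (i : Int)) (j : Int) = true) →
    (∀ p ∈ st.1, pvLeast g T p) →
    ∀ p ∈ (pvScanGrid r rows st).1, pvLeast g T p := by
  induction rows with
  | nil => intro r st _ hst p hp; exact hst p hp
  | cons row rest ih =>
    intro r st hrows hst
    rw [pvScanGrid]
    have hnext : ∀ (i : Nat) row', rest[i]? = some row' →
        ∀ (j : Nat) s, row'[j]? = some s → s = "X" →
        pvIsX g ((r + 1) + (i : Int)) (j : Int) = true := by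
      intro i row' hi j s hj hs
      have := hrows (i + 1) row' (by simpa using hi) j s hj hs
      have he : r + ((i : Int) + 1) = (r + 1) + (i : Int) := by ring
      simpa [he] using this
    apply ih (r + 1) _ hnext
    apply pvScanRow_sound g T row r 0 st
    · intro i s hi hs
      have := hrows 0 row (by simp) i s hi hs
      simpa using this
    · exact hst

theorem pvScanRow_nodup (row : List String) (r : Int) : ∀ (c : Int) st,
    st.1.Nodup → (pvScanRow r c row st).1.Nodup := by
  induction row with
  | nil => intro c st h; exact h
  | cons ch rest ih =>
    intro c st h
    rw [pvScanRow]
    apply ih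
    split
    · exact PySem.Set.nodup_add _ _ h
    · exact h

theorem pvScanGrid_nodup (rows : List (List String)) : ∀ (r : Int) st,
    st.1.Nodup → (pvScanGrid r rows st).1.Nodup := by
  induction rows with
  | nil => intro r st h; exact h
  | cons row rest ih =>
    intro r st h
    rw [pvScanGrid]
    exact ih _ _ (pvScanRow_nodup row r 0 st h)

-- the grid's X-cells satisfy the per-cell hypothesis of pvScanGrid_sound at offset 0
theorem pvGrid_cells_isX (g : List (List String)) :
    ∀ (i : Nat) row, g[i]? = some row → ∀ (j : Nat) s, row[j]? = some s → s = "X" →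
      pvIsX g ((0 : Int) + (i : Int)) (j : Int) = true := by
  intro i row hi j s hj hs
  have hilen : i < g.length := by
    by_contra h
    rw [List.getElem?_eq_none (by omega)] at hi
    exact absurd hi (by simp)
  have hjlen : j < row.length := by
    by_contra h
    rw [List.getElem?_eq_none (by omega)] at hj
    exact absurd hj (by simp)
  rw [pvIsX_eq_nat]
  have h1 : ((0 : Int) + (i : Int)).toNat = i := by omega
  have h2 : ((j : Int)).toNat = j := by omega
  rw [h1, h2, hi]
  simp only [Option.getD_some]
  subst hs
  have hcell : row[j] = "X" := by
    rw [← Option.some_inj, ← List.getElem?_eq_getElem hjlen, hj]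
  simp [hilen, hjlen, hcell]

-- no change in a full pass ⇒ the reach set is closed under X-adjacency
theorem pvFix_closed (g : List (List String)) (R : List (Int × Int))
    (hfix : (pvScanGrid 0 g (R, false)).2 = false)
    (q : Int × Int) (hq : pvIsX g q.1 q.2 = true) (hnm : q ∉ R) :
    pvNbrIn R q.1 q.2 = false := by
  obtain ⟨_, hconds⟩ := pvScanGrid_fix g 0 (R, false) hfix
  rw [pvIsX_eq_nat] at hq
  simp only [Bool.and_eq_true, decide_eq_true_eq, beq_iff_eq] at hq
  obtain ⟨⟨⟨⟨hr, hc⟩, ha⟩, hb⟩, hx⟩ := hq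
  have hrow : g[q.1.toNat]? = some (g[q.1.toNat]?.getD []) := by
    rw [List.getElem?_eq_getElem ha]; simp
  have hcell : (g[q.1.toNat]?.getD [])[q.2.toNat]? = some "X" := by
    rw [List.getElem?_eq_getElem hb]
    have : (g[q.1.toNat]?.getD [])[q.2.toNat]?.getD "" =
        (g[q.1.toNat]?.getD [])[q.2.toNat] := by
      rw [List.getElem?_eq_getElem hb]; rfl
    rw [← hx, ← this]
  have := hconds q.1.toNat _ hrow q.2.toNat "X" hcell
  have he1 : (0 : Int) + (q.1.toNat : Int) = q.1 := by omega
  have he2 : ((q.2.toNat : Int)) = q.2 := by omega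
  rw [he1, he2] at this
  simp only [pvCond, Bool.and_eq_false_iff] at this
  rcases this with (h1 | h2) | h3
  · exact absurd h1 (by simp)
  · have hq' : q ∈ R := by
      have hco : PySem.Set.contains R (q.1, q.2) = true := by
        revert h2; cases PySem.Set.contains R (q.1, q.2) <;> simp
      have := (PySem.Set.contains_iff _ _).mp hco
      simpa using this
    exact absurd hq' hnm
  · exact h3

-- at a fixpoint containing the start cell, the whole least region is contained in the set
theorem pvLeast_subset_fix (g : List (List String)) (start : Int × Int) (R : List (Int × Int))
    (hstart : start ∈ R)
    (hfix : ∀ q : Int × Int, pvIsX g q.1 q.2 = true → q ∉ R → pvNbrIn R q.1 q.2 = false) :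
    ∀ q, pvLeast g [start] q → q ∈ R := by
  intro q hq
  induction hq with
  | base a ha _ =>
    rcases List.mem_cons.mp ha with rfl | h
    · exact hstart
    · simp at h
  | step a b ha hb hxb ih =>
    by_contra hnb
    have hnf := hfix b hxb hnb
    -- a ∈ R is a neighbour of b, so one of b's four membership tests is true
    have hmem : pvNbrIn R b.1 b.2 = true := by
      simp only [pvNbrs, List.mem_cons, List.not_mem_nil, or_false] at hb
      rcases hb with rfl | rfl | rfl | rfl <;> simp [pvNbrIn] <;> tauto
    rw [hmem] at hnf
    exact absurd hnf (by simp)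

-- the saturation loop, started from a sound set containing the start, returns exactly the least region
theorem pvSatLoop_correct (g : List (List String)) (start : Int × Int) :
    ∀ R, R.Nodup → start ∈ R → (∀ p ∈ R, pvLeast g [start] p) →
    (pvSatLoop g R).Nodup ∧ ∀ p, p ∈ pvSatLoop g R ↔ pvLeast g [start] p := by
  suffices H : ∀ (n : Nat) R, (pvAllCells g).countP (fun p => !(PySem.Set.contains R p)) ≤ n →
      R.Nodup → start ∈ R → (∀ p ∈ R, pvLeast g [start] p) →
      (pvSatLoop g R).Nodup ∧ ∀ p, p ∈ pvSatLoop g R ↔ pvLeast g [start] p by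
    intro R h1 h2 h3
    exact H _ R le_rfl h1 h2 h3
  intro n
  induction n with
  | zero =>
    intro R hn hnd hst hsound
    rw [pvSatLoop]
    by_cases h : (pvScanGrid 0 g (R, false)).2 = true
    · -- impossible: a change strictly decreases the (already zero) count of missing cells
      exfalso
      obtain ⟨p, hpA, hpn, hpm⟩ :=
        pvScanGrid_grow g (pvAllCells g) 0 (R, false) (pvAllCells_hyp g) rfl h
      have : 0 < (pvAllCells g).countP (fun p => !(PySem.Set.contains R p)) := by
        exact List.countP_pos_iff.mpr ⟨p, hpA, (pvNotMem_iff _ _).mpr hpn⟩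
      omega
    · rw [dif_neg h]
      obtain ⟨heq, _⟩ := pvScanGrid_fix g 0 (R, false) (by simpa using h)
      rw [heq]
      refine ⟨hnd, ?_⟩
      intro p
      constructor
      · exact hsound p
      · exact pvLeast_subset_fix g start R hst
          (fun q hq hnm => pvFix_closed g R (by simpa using h) q hq hnm) p
  | succ n ihn =>
    intro R hn hnd hst hsound
    rw [pvSatLoop]
    by_cases h : (pvScanGrid 0 g (R, false)).2 = true
    · rw [dif_pos h]
      -- the pass strictly decreased the missing-cell count; invariants are preserved
      obtain ⟨p, hpA, hpn, hpm⟩ :=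
        pvScanGrid_grow g (pvAllCells g) 0 (R, false) (pvAllCells_hyp g) rfl h
      have hdec : (pvAllCells g).countP
            (fun q => !(PySem.Set.contains (pvScanGrid 0 g (R, false)).1 q)) <
          (pvAllCells g).countP (fun q => !(PySem.Set.contains R q)) := by
        refine pvCountP_lt_of_witness _ _ _ ?_ p hpA ?_ ((pvNotMem_iff _ _).mpr hpn)
        · intro x hx hPx
          exact (pvNotMem_iff _ _).mpr
            (fun hxr => (pvNotMem_iff _ _).mp hPx (pvScanGrid_mono g 0 (R, false) x hxr))
        · simpa using hpm
      refine ihn (pvScanGrid 0 g (R, false)).1 (by omega)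
        (pvScanGrid_nodup g 0 (R, false) hnd)
        (pvScanGrid_mono g 0 (R, false) start hst)
        (pvScanGrid_sound g [start] g 0 (R, false) (pvGrid_cells_isX g) hsound)
    · rw [dif_neg h]
      obtain ⟨heq, _⟩ := pvScanGrid_fix g 0 (R, false) (by simpa using h)
      rw [heq]
      refine ⟨hnd, ?_⟩
      intro p
      constructor
      · exact hsound p
      · exact pvLeast_subset_fix g start R hst
          (fun q hq hnm => pvFix_closed g R (by simpa using h) q hq hnm) p

theorem pvLength_eq_ncard (R : List (Int × Int)) (S : Set (Int × Int)) (hnd : R.Nodup)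
    (hmem : ∀ p, p ∈ R ↔ p ∈ S) : R.length = S.ncard := by
  have hS : S = ↑R.toFinset := by
    ext p
    rw [← hmem p]
    simp
  rw [hS, Set.ncard_coe_finset, List.toFinset_card_of_nodup hnd]

-- ===== VERDICT (by name: the statement is the Claim_ definition above) =====
theorem countSkin_spec : Claim_equal_countSkin := by
  intro room Srow Scol _
  show countSkin room Srow Scol = countSkin_alt room Srow Scol
  rw [countSkin, countSkin_alt, pvA_loop_eq]
  by_cases hx : pvIsX room Srow Scol = true
  · rw [if_pos hx]
    have hstart : pvLeast room [(Srow, Scol)] (Srow, Scol) :=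
      pvLeast.base (Srow, Scol) (by simp) hx
    obtain ⟨hnd, hiff⟩ := pvSatLoop_correct room (Srow, Scol) [(Srow, Scol)]
      (by simp) (by simp) (by intro p hp; simp at hp; subst hp; exact hstart)
    have hlen : (pvSatLoop room [(Srow, Scol)]).length =
        (setOf (pvLeast room [(Srow, Scol)])).ncard :=
      pvLength_eq_ncard _ _ hnd (by intro p; rw [hiff p]; simp)
    rw [pvCountP_eq_ncard, ← hlen]
    simp
  · rw [if_neg hx]
    have hx' : pvIsX room Srow Scol = false := by simpa using hx
    rw [show ((Srow, Scol) : Int × Int) = ((Srow, Scol) : Int × Int) from rfl]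
    rw [pvCountP_cons_neg room (Srow, Scol) [] hx', pvCountP_nil]
    simp
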